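-- pv_equiv track=rewrite | github.com/zengx2wenhui-web/green-logistics-platform | pages/_ui_shared.py | _get_sidebar_nav_item_key
-- ===== SOURCE A (Python) =====
-- def _normalize_page_path(page: str | None) -> str:
--     return str(page or "").strip().replace("\\", "/").lower()
--
-- def _get_sidebar_nav_item_key(page: str) -> str:
--     normalized = _normalize_page_path(page)
--     slug_parts: list[str] = []
--     last_was_dash = False
--
--     for char in normalized:
--         if char.isalnum():
--             slug_parts.append(char)
--             last_was_dash = False
--         elif not last_was_dash:
--             slug_parts.append("-")
--             last_was_dash = True
--
--     slug = "".join(slug_parts).strip("-") or "home"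
--     return f"glp-sidebar-nav-{slug}"
-- ===== SOURCE B (Python) =====
-- def _normalize_page_path(page):
--     return str(page or "").strip().replace("\\", "/").lower()
--
-- def _get_sidebar_nav_item_key(page: str) -> str:
--     normalized = _normalize_page_path(page)
--     parts = []
--     i = 0
--     n = len(normalized)
--     while i < n:
--         if normalized[i].isalnum():
--             j = i + 1
--             while j < n and normalized[j].isalnum():
--                 j += 1
--             parts.append(normalized[i:j])
--             i = j
--         else:
--             i += 1
--     slug = "-".join(parts) or "home"
--     return f"glp-sidebar-nav-{slug}"
-- ===== Notes on version B (the rewrite author's own statement) =====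
-- stated objective: alternative
-- what changed: Replaced the char-by-char loop with a last_was_dash flag by a run tokenizer: scan the alphanumeric runs as whole slices and join them with single dashes, which reproduces the collapsed and edge-stripped dashes by construction.
import Mathlib
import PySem

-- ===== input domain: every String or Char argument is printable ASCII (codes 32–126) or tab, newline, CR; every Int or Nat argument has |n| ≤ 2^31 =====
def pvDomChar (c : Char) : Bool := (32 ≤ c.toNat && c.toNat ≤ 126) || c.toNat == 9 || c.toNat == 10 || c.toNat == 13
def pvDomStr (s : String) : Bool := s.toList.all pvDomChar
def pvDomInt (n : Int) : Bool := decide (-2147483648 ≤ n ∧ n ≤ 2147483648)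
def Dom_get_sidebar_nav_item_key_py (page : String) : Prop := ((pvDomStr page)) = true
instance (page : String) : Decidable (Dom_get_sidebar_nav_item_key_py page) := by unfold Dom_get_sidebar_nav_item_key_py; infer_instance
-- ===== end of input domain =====

-- B replaces A's char-by-char dash-flag loop by a tokenizer that collects whole alphanumeric
-- runs and joins them with single dashes (alternative decomposition, same cost).

-- ===== PORT A =====
-- shared helper: both Pythons define the identical _normalize_page_path
def normalize_page_path (page : String) : String :=
  PySem.Str.lower (PySem.Str.replace (PySem.Str.strip (if page = "" then "" else page)) "\\" "/")

-- one step of A's for-loop: state = (slug_parts, last_was_dash)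
def aStep (st : List Char × Bool) (c : Char) : List Char × Bool :=
  if PySem.Chars.isalnum c then (st.1 ++ [c], false)
  else if st.2 then st
  else (st.1 ++ ['-'], true)

def get_sidebar_nav_item_key_py (page : String) : String :=
  let normalized := normalize_page_path page
  let st := normalized.toList.foldl aStep ([], false)
  let stripped := PySem.Chars.stripChars st.1 ['-']
  let slug := if stripped = [] then "home".toList else stripped
  String.ofList ("glp-sidebar-nav-".toList ++ slug)

-- ===== PORT B =====
-- B's outer while loop: skip a non-alnum char, or slice out a maximal alnum run (inner j loop)
def bTokens : List Char → List (List Char)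
  | [] => []
  | c :: rest =>
    if PySem.Chars.isalnum c then
      (c :: rest.takeWhile PySem.Chars.isalnum) :: bTokens (rest.dropWhile PySem.Chars.isalnum)
    else bTokens rest
termination_by cs => cs.length
decreasing_by
  · simpa using Nat.lt_succ_of_le (List.length_dropWhile_le _ _)
  · simp

def get_sidebar_nav_item_key_py_alt (page : String) : String :=
  let normalized := normalize_page_path page
  let joined := PySem.Chars.join ['-'] (bTokens normalized.toList)
  let slug := if joined = [] then "home".toList else joined
  String.ofList ("glp-sidebar-nav-".toList ++ slug)

-- ===== PRECONDITION & SPEC =====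
def Spec_get_sidebar_nav_item_key_py (page : String) (out : String) : Prop := out = get_sidebar_nav_item_key_py_alt page
instance (page : String) (out : String) : Decidable (Spec_get_sidebar_nav_item_key_py page out) := by unfold Spec_get_sidebar_nav_item_key_py; infer_instance

-- ===== CLAIM (what is proved, stated in full; the proofs are below) =====
def Claim_equal_get_sidebar_nav_item_key_py : Prop := ∀ (page : String), Dom_get_sidebar_nav_item_key_py page → Spec_get_sidebar_nav_item_key_py page (get_sidebar_nav_item_key_py page)

-- ===== LEMMAS AND PROOFS =====

-- A's loop as a front-building recursion (proof helper)
def aL : List Char → Bool → List Char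
  | [], _ => []
  | c :: rest, lastDash =>
    if PySem.Chars.isalnum c then c :: aL rest false
    else if lastDash then aL rest lastDash
    else '-' :: aL rest true

theorem foldl_aStep (cs : List Char) : ∀ (acc : List Char) (b : Bool),
    (cs.foldl aStep (acc, b)).1 = acc ++ aL cs b := by
  induction cs with
  | nil => simp [aL]
  | cons c rest ih =>
    intro acc b
    by_cases h : PySem.Chars.isalnum c
    · simp [List.foldl_cons, aStep, aL, h, ih]
    · cases b with
      | true => simp [List.foldl_cons, aStep, aL, h, ih]
      | false => simp [List.foldl_cons, aStep, aL, h, ih]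

-- trailing dash of A's output
def lastNonAl (cs : List Char) : Bool :=
  match cs.getLast? with | some c => !PySem.Chars.isalnum c | none => false

def tdash (cs : List Char) : List Char :=
  if bTokens cs ≠ [] ∧ lastNonAl cs = true then ['-'] else []

theorem aL_false (cs : List Char) :
    aL cs false = (match cs with | [] => ([] : List Char) | c :: _ => if PySem.Chars.isalnum c then [] else ['-']) ++ aL cs true := by
  cases cs with
  | nil => rfl
  | cons c rest =>
    by_cases h : PySem.Chars.isalnum c <;> simp [aL, h]

theorem tokens_sound (cs : List Char) : ∀ t ∈ bTokens cs, t ≠ [] ∧ ∀ c ∈ t, PySem.Chars.isalnum c = true := by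
  fun_induction bTokens cs with
  | case1 => simp
  | case2 c rest h ih =>
    intro t ht
    rcases List.mem_cons.mp ht with rfl | ht
    · refine ⟨by simp, ?_⟩
      intro d hd
      rcases List.mem_cons.mp hd with rfl | hd
      · exact h
      · exact List.mem_takeWhile_imp hd
    · exact ih t ht
  | case3 c rest h ih => exact ih

theorem tokens_nil (cs : List Char) (h : bTokens cs = []) : ∀ c ∈ cs, PySem.Chars.isalnum c = false := by
  fun_induction bTokens cs with
  | case1 => simp
  | case2 c rest hc ih => simp at h
  | case3 c rest hc ih =>
    intro d hd
    rcases List.mem_cons.mp hd with rfl | hd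
    · simpa using hc
    · exact ih h d hd

theorem aL_run (run : List Char) (rest : List Char) (h : ∀ c ∈ run, PySem.Chars.isalnum c = true) :
    aL (run ++ rest) false = run ++ aL rest false := by
  induction run with
  | nil => simp
  | cons c run' ih =>
    have hc := h c (List.mem_cons_self ..)
    simp [aL, hc, ih (fun d hd => h d (List.mem_cons_of_mem _ hd))]

theorem lastNonAl_append (xs cs : List Char) (h : cs ≠ []) : lastNonAl (xs ++ cs) = lastNonAl cs := by
  unfold lastNonAl
  rw [List.getLast?_append]
  cases hc : cs.getLast? with
  | none => exact absurd (List.getLast?_eq_none_iff.mp hc) h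
  | some c => simp

theorem lastNonAl_of_all (cs : List Char) (h : ∀ c ∈ cs, PySem.Chars.isalnum c = true) :
    lastNonAl cs = false := by
  unfold lastNonAl
  cases hc : cs.getLast? with
  | none => rfl
  | some c => simp [h c (List.mem_of_getLast? hc)]

theorem lastNonAl_of_none (cs : List Char) (h : ∀ c ∈ cs, PySem.Chars.isalnum c = false) (hne : cs ≠ []) :
    lastNonAl cs = true := by
  unfold lastNonAl
  cases hc : cs.getLast? with
  | none => exact absurd (List.getLast?_eq_none_iff.mp hc) hne
  | some c => simp [h c (List.mem_of_getLast? hc)]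

theorem aL_main (cs : List Char) : aL cs true = PySem.Chars.join ['-'] (bTokens cs) ++ tdash cs := by
  fun_induction bTokens cs with
  | case1 => simp [aL, tdash, bTokens, PySem.Chars.join_nil]
  | case2 c rest hc ih =>
    have htk : ∀ d ∈ rest.takeWhile PySem.Chars.isalnum, PySem.Chars.isalnum d = true :=
      fun d hd => List.mem_takeWhile_imp hd
    have hrest : rest.takeWhile PySem.Chars.isalnum ++ rest.dropWhile PySem.Chars.isalnum = rest :=
      List.takeWhile_append_dropWhile
    have haL : aL rest false
        = rest.takeWhile PySem.Chars.isalnum ++ aL (rest.dropWhile PySem.Chars.isalnum) false := by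
      conv_lhs => rw [← hrest]
      exact aL_run _ _ htk
    have hbn : bTokens (c :: rest)
        = (c :: rest.takeWhile PySem.Chars.isalnum) :: bTokens (rest.dropWhile PySem.Chars.isalnum) := by
      simp [bTokens, hc]
    have hsplit : c :: rest
        = (c :: rest.takeWhile PySem.Chars.isalnum) ++ rest.dropWhile PySem.Chars.isalnum := by
      simp [hrest]
    rw [show aL (c :: rest) true = c :: aL rest false by simp [aL, hc], haL]
    cases hdr : rest.dropWhile PySem.Chars.isalnum with
    | nil =>
      rw [hdr] at hsplit
      have hall : ∀ d ∈ c :: rest.takeWhile PySem.Chars.isalnum, PySem.Chars.isalnum d = true := by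
        intro d hd
        rcases List.mem_cons.mp hd with rfl | hd
        · exact hc
        · exact htk d hd
      have hlast : lastNonAl (c :: rest) = false := by
        rw [show c :: rest = c :: rest.takeWhile PySem.Chars.isalnum by simpa using hsplit]
        exact lastNonAl_of_all _ hall
      simp [aL, bTokens, tdash, hlast, PySem.Chars.join_singleton]
    | cons d rs =>
      rw [hdr] at ih hsplit hbn
      have hd : PySem.Chars.isalnum d = false := by
        have hh := List.head?_dropWhile_not PySem.Chars.isalnum rest
        rw [hdr] at hh
        simpa using hh
      have h2 : aL (d :: rs) false = '-' :: aL (d :: rs) true := by simp [aL, hd]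
      rw [h2, ih]
      have hlast : lastNonAl (c :: rest) = lastNonAl (d :: rs) := by
        rw [hsplit]
        exact lastNonAl_append _ _ (by simp)
      cases hbt : bTokens (d :: rs) with
      | nil =>
        have hnone := tokens_nil _ hbt
        have hln : lastNonAl (c :: rest) = true := by
          rw [hlast]
          exact lastNonAl_of_none _ hnone (by simp)
        simp [hbt, tdash, hbn, hln, PySem.Chars.join_singleton, PySem.Chars.join_nil]
      | cons t ts =>
        have htd : tdash (c :: rest) = tdash (d :: rs) := by
          unfold tdash
          rw [hbn, hbt, hlast]
          simp
        rw [htd, PySem.Chars.join_cons_cons]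
        simp
  | case3 c rest hc ih =>
    have hb : bTokens (c :: rest) = bTokens rest := by simp [bTokens, hc]
    have ht : tdash (c :: rest) = tdash rest := by
      unfold tdash
      rw [hb]
      cases hr : rest with
      | nil => simp [show bTokens ([] : List Char) = [] from by simp [bTokens]]
      | cons e es =>
        rw [← hr, show c :: rest = [c] ++ rest from rfl, lastNonAl_append _ _ (by simp [hr])]
    simp [aL, hc, ih, ht]

theorem strip_sandwich (l j r : List Char) (hl : ∀ c ∈ l, c = '-') (hr : ∀ c ∈ r, c = '-')
    (hj1 : j.head? ≠ some '-') (hj2 : j.getLast? ≠ some '-') :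
    PySem.Chars.stripChars (l ++ j ++ r) ['-'] = j := by
  simp only [PySem.Chars.stripChars]
  have hdl : List.dropWhile (fun c => List.contains ['-'] c) l = l.dropWhile (fun c => List.contains ['-'] c) := rfl
  have hl' : List.dropWhile (fun c => List.contains ['-'] c) l = [] := by
    rw [List.dropWhile_eq_nil_iff]
    intro c hc
    simp [hl c hc]
  have hr' : List.dropWhile (fun c => List.contains ['-'] c) r = [] := by
    rw [List.dropWhile_eq_nil_iff]
    intro c hc
    simp [hr c hc]
  rw [List.append_assoc, List.dropWhile_append, hl']
  simp only [List.isEmpty_nil, if_true]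
  cases hj : j with
  | nil =>
    simp only [List.nil_append]
    rw [hr']
    simp
  | cons a j' =>
    have ha : a ≠ '-' := by
      intro h
      exact hj1 (by simp [hj, h])
    have hstep : List.dropWhile (fun c => List.contains ['-'] c) (a :: (j' ++ r)) = a :: (j' ++ r) :=
      List.dropWhile_cons_of_neg (by simp [ha])
    simp only [List.cons_append]
    rw [hstep, ← List.cons_append, List.reverse_append, List.dropWhile_append]
    have hrr : List.dropWhile (fun c => List.contains ['-'] c) r.reverse = [] := by
      rw [List.dropWhile_eq_nil_iff]
      intro c hc
      simp [hr c (List.mem_reverse.mp hc)]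
    rw [hrr]
    simp only [List.isEmpty_nil, if_true]
    cases hjr : (a :: j').reverse with
    | nil => simp at hjr
    | cons b w =>
      have hb : b ≠ '-' := by
        intro h
        apply hj2
        rw [hj, ← List.head?_reverse, hjr]
        simp [h]
      rw [List.dropWhile_cons_of_neg (by simp [hb]), ← hjr]
      simp

theorem join_ne_nil (t : List Char) (ts : List (List Char)) (h : t ≠ []) :
    PySem.Chars.join ['-'] (t :: ts) ≠ [] := by
  cases ts with
  | nil => simpa [PySem.Chars.join_singleton] using h
  | cons u us =>
    rw [PySem.Chars.join_cons_cons]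
    simp [h]

theorem join_head (ts : List (List Char)) (h : ∀ t ∈ ts, t ≠ [] ∧ ∀ c ∈ t, PySem.Chars.isalnum c = true) :
    ∀ c, (PySem.Chars.join ['-'] ts).head? = some c → PySem.Chars.isalnum c = true := by
  cases ts with
  | nil => simp [PySem.Chars.join_nil]
  | cons t us =>
    obtain ⟨ht, hal⟩ := h t (List.mem_cons_self ..)
    have hh : (PySem.Chars.join ['-'] (t :: us)).head? = t.head? := by
      cases us with
      | nil => rw [PySem.Chars.join_singleton]
      | cons u vs =>
        rw [PySem.Chars.join_cons_cons, List.append_assoc, List.head?_append_of_ne_nil _ ht]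
    intro c hc
    rw [hh] at hc
    exact hal c (List.mem_of_mem_head? hc)

theorem join_last (ts : List (List Char)) (h : ∀ t ∈ ts, t ≠ [] ∧ ∀ c ∈ t, PySem.Chars.isalnum c = true) :
    ∀ c, (PySem.Chars.join ['-'] ts).getLast? = some c → PySem.Chars.isalnum c = true := by
  induction ts with
  | nil => simp [PySem.Chars.join_nil]
  | cons t us ih =>
    cases us with
    | nil =>
      rw [PySem.Chars.join_singleton]
      intro c hc
      exact (h t (List.mem_cons_self ..)).2 c (List.mem_of_getLast? hc)
    | cons u vs =>
      have hih := ih (fun x hx => h x (List.mem_cons_of_mem _ hx))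
      intro c hc
      rw [PySem.Chars.join_cons_cons, List.getLast?_append] at hc
      have hne : PySem.Chars.join ['-'] (u :: vs) ≠ [] :=
        join_ne_nil _ _ (h u (List.mem_cons_of_mem _ (List.mem_cons_self ..))).1
      rw [List.getLast?_append] at hc
      cases hg : (PySem.Chars.join ['-'] (u :: vs)).getLast? with
      | none => exact absurd (List.getLast?_eq_none_iff.mp hg) hne
      | some b =>
        rw [hg] at hc
        simp only [Option.some_or] at hc
        exact hih c (by rw [hg, ← hc])

theorem main_strip (cs : List Char) :
    PySem.Chars.stripChars (aL cs false) ['-'] = PySem.Chars.join ['-'] (bTokens cs) := by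
  rw [aL_false, aL_main, ← List.append_assoc]
  apply strip_sandwich
  · cases cs with
    | nil => simp
    | cons c rest =>
      by_cases h : PySem.Chars.isalnum c <;> simp [h]
  · unfold tdash
    split <;> simp
  · intro hhd
    exact absurd (join_head (bTokens cs) (tokens_sound cs) '-' hhd) (by decide)
  · intro hlt
    exact absurd (join_last (bTokens cs) (tokens_sound cs) '-' hlt) (by decide)

-- ===== VERDICT (by name: the statement is the Claim_ definition above) =====
theorem get_sidebar_nav_item_key_py_spec : Claim_equal_get_sidebar_nav_item_key_py := by
  intro page _
  unfold Spec_get_sidebar_nav_item_key_py get_sidebar_nav_item_key_py get_sidebar_nav_item_key_py_alt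
  have hfold : (((normalize_page_path page).toList.foldl aStep ([], false)).1)
      = aL (normalize_page_path page).toList false := by
    rw [foldl_aStep]
    simp
  simp [hfold, main_strip]
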